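-- pv_equiv track=rewrite | github.com/Abdelrahman-Shorim/Robotic-Waiter | nodemcu/ui.py | determine_directions
-- ===== SOURCE A (Python) =====
-- def determine_direction(point1, point2):
--     x1, y1 = point1
--     x2, y2 = point2
--     if x1 == x2:
--         if y2 < y1:
--             return "Up"
--         else:
--             return "Down"
--     elif y1 == y2:
--         if x2 > x1:
--             return "Right"
--         else:
--             return "Left"
--     return "Unknown"  # Default case if no other conditions are met
--
-- def determine_directions(points):
--     directions = []
--
--     if len(points) < 2:
--         return directions  # Not enough points to determine direction
--
--     # Determine initial direction
--     initial_direction = determine_direction(points[0], points[1])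
--     directions.append(initial_direction)
--
--     previous_direction = initial_direction
--
--     for i in range(1, len(points) - 1):
--         current_point = points[i]
--         next_point = points[i + 1]
--
--         current_direction = determine_direction(current_point, next_point)
--
--         if current_direction == previous_direction:
--             directions.append("Continue")
--         else:
--             directions.append(current_direction)
--             previous_direction = current_direction
--
--     return directions
-- ===== SOURCE B (Python) =====
-- def determine_direction(point1, point2):
--     x1, y1 = point1
--     x2, y2 = point2
--     if x1 == x2:
--         if y2 < y1:
--             return "Up"
--         else:
--             return "Down"
--     elif y1 == y2:
--         if x2 > x1:
--             return "Right"
--         else: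
--             return "Left"
--     return "Unknown"
--
-- def determine_directions(points):
--     # pass 1: raw direction of every consecutive pair
--     raw = [determine_direction(a, b) for a, b in zip(points, points[1:])]
--     # pass 2: collapse each run of equal directions into "dir, Continue, Continue, ..."
--     out = []
--     i = 0
--     n = len(raw)
--     while i < n:
--         j = i + 1
--         while j < n and raw[j] == raw[i]:
--             j += 1
--         out.append(raw[i])
--         out.extend(["Continue"] * (j - i - 1))
--         i = j
--     return out
-- ===== Notes on version B (the rewrite author's own statement) =====
-- stated objective: alternative
-- what changed: Replaces A's fused index loop that threads a previous_direction variable with two separate passes: first build the raw direction list over zip(points, points[1:]), then run-length-collapse consecutive equal entries (emit the direction once, then 'Continue' for the rest of each run).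
import Mathlib
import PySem

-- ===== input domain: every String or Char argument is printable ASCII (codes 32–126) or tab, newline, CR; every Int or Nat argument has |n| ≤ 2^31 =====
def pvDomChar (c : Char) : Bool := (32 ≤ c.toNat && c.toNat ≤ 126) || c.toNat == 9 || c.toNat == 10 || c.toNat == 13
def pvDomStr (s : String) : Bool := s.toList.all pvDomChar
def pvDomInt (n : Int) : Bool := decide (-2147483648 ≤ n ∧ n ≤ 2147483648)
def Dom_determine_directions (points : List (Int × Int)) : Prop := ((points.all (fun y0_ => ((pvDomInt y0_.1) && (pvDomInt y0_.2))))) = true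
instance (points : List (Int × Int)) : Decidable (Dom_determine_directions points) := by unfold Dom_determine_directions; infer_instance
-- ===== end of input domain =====

-- B replaces the fused previous_direction loop by two passes (raw pair directions, then run-length collapse); same cost, different decomposition.

-- ===== PORT A =====
def determine_direction (point1 point2 : Int × Int) : String :=
  let x1 := point1.1
  let y1 := point1.2
  let x2 := point2.1
  let y2 := point2.2
  if x1 == x2 then
    if y2 < y1 then "Up" else "Down"
  else if y1 == y2 then
    if x2 > x1 then "Right" else "Left"
  else "Unknown"

def determine_directions (points : List (Int × Int)) : List String :=
  if points.length < 2 then []  -- not enough points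
  else
    -- indices 0 and 1 are in range here, so the pyGetD default is never returned
    let initial_direction := determine_direction (PySem.List.pyGetD points 0 ((0 : Int), (0 : Int))) (PySem.List.pyGetD points 1 ((0 : Int), (0 : Int)))
    -- state = (directions, previous_direction); for i in range(1, len(points) - 1)
    let st := (PySem.List.pyRange 1 ((points.length : Int) - 1)).foldl
      (fun (acc : List String × String) i =>
        let current_point := PySem.List.pyGetD points i ((0 : Int), (0 : Int))
        let next_point := PySem.List.pyGetD points (i + 1) ((0 : Int), (0 : Int))
        let current_direction := determine_direction current_point next_point
        if current_direction == acc.2 then (acc.1 ++ ["Continue"], acc.2)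
        else (acc.1 ++ [current_direction], current_direction))
      ([initial_direction], initial_direction)
    st.1

-- ===== PORT B =====
def determine_direction_alt (point1 point2 : Int × Int) : String :=
  let x1 := point1.1
  let y1 := point1.2
  let x2 := point2.1
  let y2 := point2.2
  if x1 == x2 then
    if y2 < y1 then "Up" else "Down"
  else if y1 == y2 then
    if x2 > x1 then "Right" else "Left"
  else "Unknown"

-- Source B's run-collapse pass: the inner `while` that scans a run of entries equal to raw[i]
-- is the takeWhile/dropWhile split of the remaining list.
def collapse_runs : List String → List String
  | [] => []
  | d :: rest =>
    d :: ((rest.takeWhile (fun x => x == d)).map (fun _ => "Continue")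
          ++ collapse_runs (rest.dropWhile (fun x => x == d)))
termination_by l => l.length
decreasing_by
  simp only [List.length_cons]
  exact Nat.lt_succ_of_le (List.length_dropWhile_le _ _)

def determine_directions_alt (points : List (Int × Int)) : List String :=
  -- raw = [determine_direction(a, b) for a, b in zip(points, points[1:])]
  let raw := (points.zip (points.drop 1)).map (fun p => determine_direction_alt p.1 p.2)
  collapse_runs raw

-- ===== PRECONDITION & SPEC =====
def Spec_determine_directions (points : List (Int × Int)) (out : List String) : Prop := out = determine_directions_alt points
instance (points : List (Int × Int)) (out : List String) : Decidable (Spec_determine_directions points out) := by unfold Spec_determine_directions; infer_instance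

-- ===== CLAIM (what is proved, stated in full; the proofs are below) =====
def Claim_equal_determine_directions : Prop := ∀ (points : List (Int × Int)), Dom_determine_directions points → Spec_determine_directions points (determine_directions points)

-- ===== LEMMAS AND PROOFS =====

-- A's loop, abstracted over the list of raw directions it walks with previous_direction.
def chainA : List String → String → List String
  | [], _ => []
  | c :: cs, prev => if c == prev then "Continue" :: chainA cs prev else c :: chainA cs c

theorem chainA_eq_collapse_tail (l : List String) (d : String) :
    chainA l d = (l.takeWhile (fun x => x == d)).map (fun _ => "Continue")
      ++ collapse_runs (l.dropWhile (fun x => x == d)) := by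
  induction l generalizing d with
  | nil => simp [chainA, collapse_runs]
  | cons c cs ih =>
    by_cases h : c = d
    · subst h
      simp [chainA, ih]
    · have hb : (c == d) = false := by simp [h]
      simp [chainA, hb, collapse_runs, ih]

theorem collapse_cons (d : String) (l : List String) :
    collapse_runs (d :: l) = d :: chainA l d := by
  rw [chainA_eq_collapse_tail, collapse_runs]

theorem foldl_chainA (l : List String) (acc : List String) (prev : String) :
    (l.foldl (fun (a : List String × String) c =>
        if c == a.2 then (a.1 ++ ["Continue"], a.2) else (a.1 ++ [c], c))
      (acc, prev)).1 = acc ++ chainA l prev := by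
  induction l generalizing acc prev with
  | nil => simp [chainA]
  | cons c cs ih =>
    rw [List.foldl_cons]
    by_cases h : c = prev
    · subst h
      rw [if_pos (show (c == c) = true by simp)]
      rw [ih]
      simp [chainA]
    · have hb : (c == prev) = false := by simp [h]
      rw [if_neg (by simp [hb])]
      rw [ih]
      simp [chainA, hb]

-- the two helper ports are syntactically identical
theorem dir_eq : determine_direction = determine_direction_alt := rfl

-- A on a list of length ≥ 2 computes chainA over the raw tail directions
theorem determine_directions_cons (p0 p1 : Int × Int) (rest : List (Int × Int)) :
    determine_directions (p0 :: p1 :: rest)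
      = determine_direction p0 p1
        :: chainA (((p1 :: rest).zip rest).map (fun p => determine_direction p.1 p.2))
             (determine_direction p0 p1) := by
  have hlen : ¬ ((p0 :: p1 :: rest).length < 2) := by simp
  unfold determine_directions
  rw [if_neg hlen]
  have h0 : PySem.List.pyGetD (p0 :: p1 :: rest) 0 ((0 : Int), (0 : Int)) = p0 := by
    rw [PySem.List.pyGetD_ofNat']; rfl
  have h1 : PySem.List.pyGetD (p0 :: p1 :: rest) 1 ((0 : Int), (0 : Int)) = p1 := by
    rw [PySem.List.pyGetD_ofNat']; rfl
  simp only [h0, h1]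
  -- the index range is range(1, len(zs)) for zs = zip(points, points[1:])
  have hzlen : (((p0 :: p1 :: rest).length : Int) - 1)
      = (((p0 :: p1 :: rest).zip (p1 :: rest)).length : Int) := by
    simp [List.length_zip]
  rw [hzlen]
  -- replace the two point lookups by one lookup in the zipped list
  rw [PySem.List.foldl_congr_mem _ _
    (fun (acc : List String × String) (j : Int) =>
      let q := PySem.List.pyGetD ((p0 :: p1 :: rest).zip (p1 :: rest)) j (((0 : Int), (0 : Int)), ((0 : Int), (0 : Int)))
      let current_direction := determine_direction q.1 q.2
      if current_direction == acc.2 then (acc.1 ++ ["Continue"], acc.2)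
      else (acc.1 ++ [current_direction], current_direction))
    _ ?_]
  · rw [PySem.List.foldl_pyRange_pyGetD'
      ((p0 :: p1 :: rest).zip (p1 :: rest)) (((0 : Int), (0 : Int)), ((0 : Int), (0 : Int)))
      (fun (acc : List String × String) (q : (Int × Int) × (Int × Int)) =>
        let current_direction := determine_direction q.1 q.2
        if current_direction == acc.2 then (acc.1 ++ ["Continue"], acc.2)
        else (acc.1 ++ [current_direction], current_direction))
      _ (by norm_num)]
    have hdrop : (((p0 :: p1 :: rest).zip (p1 :: rest)).drop (1 : Int).toNat)
        = (p1 :: rest).zip rest := rfl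
    rw [hdrop]
    -- fold the loop into chainA
    have := foldl_chainA (((p1 :: rest).zip rest).map (fun p => determine_direction p.1 p.2))
      [determine_direction p0 p1] (determine_direction p0 p1)
    rw [List.foldl_map] at this
    simpa using this
  · intro acc j hj
    have hb := (PySem.List.mem_pyRange_one).1 hj
    have hlo : (0 : Int) ≤ j := by omega
    have hzl : (((p0 :: p1 :: rest).zip (p1 :: rest)).length : Int) = (rest.length : Int) + 1 := by
      simp [List.length_zip]
    have hjlt : j < (rest.length : Int) + 1 := by omega
    have hjn : j.toNat < ((p0 :: p1 :: rest).zip (p1 :: rest)).length := by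
      simp [List.length_zip]; omega
    have e1 : PySem.List.pyGetD (p0 :: p1 :: rest) j ((0 : Int), (0 : Int))
        = (p0 :: p1 :: rest)[j.toNat]'(by simp; omega) := by
      exact PySem.List.pyGetD_eq_getElem _ _ hlo (by simp; omega)
    have e2 : PySem.List.pyGetD (p0 :: p1 :: rest) (j + 1) ((0 : Int), (0 : Int))
        = (p0 :: p1 :: rest)[(j + 1).toNat]'(by simp; omega) := by
      exact PySem.List.pyGetD_eq_getElem _ _ (by omega) (by simp; omega)
    have ez : PySem.List.pyGetD ((p0 :: p1 :: rest).zip (p1 :: rest)) j (((0 : Int), (0 : Int)), ((0 : Int), (0 : Int)))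
        = ((p0 :: p1 :: rest).zip (p1 :: rest))[j.toNat]'hjn := by
      exact PySem.List.pyGetD_eq_getElem _ _ hlo (by exact_mod_cast hjlt.trans_eq (by simp [List.length_zip]))
    have hsucc : (j + 1).toNat = j.toNat + 1 := by omega
    simp only [e1, e2, ez, List.getElem_zip, hsucc, List.getElem_cons_succ]

-- B unfolded on a list of length ≥ 2
theorem determine_directions_alt_cons (p0 p1 : Int × Int) (rest : List (Int × Int)) :
    determine_directions_alt (p0 :: p1 :: rest)
      = collapse_runs (determine_direction_alt p0 p1
          :: ((p1 :: rest).zip rest).map (fun p => determine_direction_alt p.1 p.2)) := rfl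

-- ===== VERDICT (by name: the statement is the Claim_ definition above) =====
theorem determine_directions_spec : Claim_equal_determine_directions := by
  intro points _
  unfold Spec_determine_directions
  match points with
  | [] => simp [determine_directions, determine_directions_alt, collapse_runs]
  | [p] => simp [determine_directions, determine_directions_alt, collapse_runs]
  | p0 :: p1 :: rest =>
    have hA := determine_directions_cons p0 p1 rest
    have hB := determine_directions_alt_cons p0 p1 rest
    rw [hA, hB, collapse_cons, dir_eq]
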